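-- pv_equiv track=rewrite | github.com/ngallodev/mariadb_tuning | file_format_files/convert_parenthesized_sql_to_tab.py | parse_sql_fields
-- ===== SOURCE A (Python) =====
-- from typing import Iterator, List
--
-- def parse_sql_fields(record: str) -> List[str]:
--     fields: List[str] = []
--     field_chars: List[str] = []
--     in_string = False
--     escape = False
--     current_is_string = False
--     i = 0
--     length = len(record)
--     whitespace = {" ", "\t", "\r", "\n"}
--
--     while i < length:
--         ch = record[i]
--         if in_string:
--             if escape:
--                 if ch == "n":
--                     field_chars.append("\n")
--                 elif ch == "r":
--                     field_chars.append("\n")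
--                 elif ch == "t":
--                     field_chars.append(" ")
--                 elif ch == "0":
--                     # skip NUL
--                     pass
--                 else:
--                     field_chars.append(ch)
--                 escape = False
--             elif ch == "\\":
--                 escape = True
--             elif ch == "'":
--                 if i + 1 < length and record[i + 1] == "'":
--                     field_chars.append("'")
--                     i += 1
--                 else:
--                     in_string = False
--             else:
--                 field_chars.append(ch)
--         else:
--             if ch == "'":
--                 in_string = True
--                 current_is_string = True
--             elif ch == ",":
--                 token = "".join(field_chars)
--                 fields.append(token if current_is_string else token.strip())
--                 field_chars = []
--                 current_is_string = False
--             elif ch in whitespace: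
--                 # Ignore whitespace between values when not inside a string
--                 if not field_chars:
--                     pass
--                 elif current_is_string:
--                     # Ignore trailing whitespace that follows a quoted value
--                     pass
--                 else:
--                     field_chars.append(ch)
--             else:
--                 field_chars.append(ch)
--         i += 1
--
--     if in_string:
--         raise ValueError("Unterminated string literal")
--
--     token = "".join(field_chars)
--     fields.append(token if current_is_string else token.strip())
--
--     return fields
-- ===== SOURCE B (Python) =====
-- from typing import List, Tuple
--
-- _WS = {" ", "\t", "\r", "\n"}
-- _ESC = {"n": "\n", "r": "\n", "t": " ", "0": ""}
--
--
-- def _read_quoted(record: str, i: int, n: int, out: List[str]) -> int: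
--     """Consume a quoted string body starting just after the opening quote;
--     return the index just past the closing quote."""
--     while i < n:
--         ch = record[i]
--         if ch == "\\":
--             if i + 1 >= n:
--                 break
--             out.append(_ESC.get(record[i + 1], record[i + 1]))
--             i += 2
--         elif ch == "'":
--             if i + 1 < n and record[i + 1] == "'":
--                 out.append("'")
--                 i += 2
--             else:
--                 return i + 1
--         else:
--             out.append(ch)
--             i += 1
--     raise ValueError("Unterminated string literal")
--
--
-- def _read_field(record: str, i: int, n: int) -> Tuple[str, int]:
--     """Read one field up to (not including) a top-level comma or end of record."""
--     out: List[str] = []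
--     was_quoted = False
--     while i < n and record[i] != ",":
--         ch = record[i]
--         if ch == "'":
--             was_quoted = True
--             i = _read_quoted(record, i + 1, n, out)
--         elif ch in _WS:
--             if out and not was_quoted:
--                 out.append(ch)
--             i += 1
--         else:
--             out.append(ch)
--             i += 1
--     token = "".join(out)
--     return (token if was_quoted else token.strip()), i
--
--
-- def parse_sql_fields(record: str) -> List[str]:
--     fields: List[str] = []
--     i = 0
--     n = len(record)
--     while True:
--         field, i = _read_field(record, i, n)
--         fields.append(field)
--         if i >= n:
--             return fields
--         i += 1  # skip the comma
-- ===== Notes on version B (the rewrite author's own statement) =====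
-- stated objective: alternative
-- what changed: A's single flat while-loop with five pieces of mutable state (in_string/escape/current_is_string flags plus shared accumulators) is replaced by a recursive-descent parser: a dedicated quoted-string reader, a field reader that stops at top-level commas, and an outer per-field loop.
import Mathlib
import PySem

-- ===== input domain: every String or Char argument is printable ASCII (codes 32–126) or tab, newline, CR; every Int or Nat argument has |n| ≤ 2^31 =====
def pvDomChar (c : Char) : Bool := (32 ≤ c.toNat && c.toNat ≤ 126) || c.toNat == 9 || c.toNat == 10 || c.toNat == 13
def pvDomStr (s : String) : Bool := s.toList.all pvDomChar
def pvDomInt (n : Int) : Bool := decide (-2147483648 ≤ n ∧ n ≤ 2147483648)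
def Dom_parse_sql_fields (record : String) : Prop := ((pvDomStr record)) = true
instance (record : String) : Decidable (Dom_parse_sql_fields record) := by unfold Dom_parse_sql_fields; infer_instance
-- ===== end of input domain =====

-- B replaces A's flat five-flag character state machine by a recursive-descent parser
-- (a separate quoted-string reader, a field reader that stops at top-level commas, and
-- an outer per-field loop); objective: alternative decomposition, similar cost. Pre_
-- excludes exactly the records with an unterminated string literal, on which both the
-- Python A and the Python B raise ValueError.


-- ===== PORT A =====
-- A's while loop over indices, as recursion over the character list; the
-- `record[i+1] == "'"` lookahead becomes a pattern match on the tail.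
def aRun (cs : List Char) (fields : List String) (acc : List Char)
    (inStr esc cis : Bool) : List String :=
  match cs with
  | [] => fields ++ [if cis then String.ofList acc else PySem.Str.strip (String.ofList acc)]
  | c :: rest =>
    if inStr then
      if esc then
        aRun rest fields
          (acc ++ (if c = 'n' then ['\n'] else if c = 'r' then ['\n']
                   else if c = 't' then [' '] else if c = '0' then ([] : List Char)
                   else [c])) true false cis
      else if c = '\\' then aRun rest fields acc true true cis
      else if c = '\'' then
        match hr : rest with
        | '\'' :: rest2 => aRun rest2 fields (acc ++ ['\'']) true false cis
        | _ => aRun rest fields acc false false cis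
      else aRun rest fields (acc ++ [c]) true false cis
    else
      if c = '\'' then aRun rest fields acc true false true
      else if c = ',' then
        aRun rest
          (fields ++ [if cis then String.ofList acc else PySem.Str.strip (String.ofList acc)])
          [] false false false
      else if c = ' ' ∨ c = '\t' ∨ c = '\r' ∨ c = '\n' then
        if acc = [] then aRun rest fields acc false false cis
        else if cis then aRun rest fields acc false false cis
        else aRun rest fields (acc ++ [c]) false false cis
      else aRun rest fields (acc ++ [c]) false false cis
termination_by cs.length
decreasing_by all_goals (simp_all; try omega)


-- On records where the Python A raises ValueError (unterminated string literal) this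
-- port still appends the last token; those inputs are excluded by Pre_ below.
def parse_sql_fields (record : String) : List String :=
  aRun record.toList [] [] false false false

-- ===== PORT B =====
-- port of Source B's _ESC.get(d, d)
def bEsc (d : Char) : List Char :=
  if d = 'n' then ['\n'] else if d = 'r' then ['\n']
  else if d = 't' then [' '] else if d = '0' then [] else [d]

-- port of Source B's _read_quoted: the decoded string body and the rest of the input after
-- the closing quote; none = the ValueError (unterminated string / dangling backslash).
def bQuoted : List Char → Option (List Char × List Char)
  | [] => none
  | c :: cs =>
    if c = '\\' then
      match cs with
      | [] => none
      | d :: cs' => (fun p => (bEsc d ++ p.1, p.2)) <$> bQuoted cs'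
    else if c = '\'' then
      match cs with
      | [] => some ([], [])
      | e :: cs' =>
        if e = '\'' then (fun p => ('\'' :: p.1, p.2)) <$> bQuoted cs'
        else some ([], e :: cs')
    else (fun p => (c :: p.1, p.2)) <$> bQuoted cs

-- port of Source B's _read_field loop: the finished field and the rest (either [] or
-- starting at the top-level comma); fuel = remaining loop iterations (each iteration
-- consumes at least one character, so `cs.length + 1` fuel never runs out; the
-- equivalence proof below only uses the function at that fuel).
def bFieldF : Nat → List Char → Bool → List Char → Option (String × List Char)
  | 0, _, _, _ => none
  | _ + 1, [], wq, out =>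
    some ((if wq then String.ofList out else PySem.Str.strip (String.ofList out)), [])
  | fuel + 1, c :: rest, wq, out =>
    if c = ',' then
      some ((if wq then String.ofList out else PySem.Str.strip (String.ofList out)), c :: rest)
    else if c = '\'' then
      match bQuoted rest with
      | none => none
      | some (chunk, rest2) => bFieldF fuel rest2 true (out ++ chunk)
    else if c = ' ' ∨ c = '\t' ∨ c = '\r' ∨ c = '\n' then
      if out ≠ [] ∧ wq = false then bFieldF fuel rest wq (out ++ [c])
      else bFieldF fuel rest wq out
    else bFieldF fuel rest wq (out ++ [c])

-- port of Source B's outer while-True loop, one fuel unit per field read; none = the ValueError.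
def bFieldsF : Nat → List Char → Option (List String)
  | 0, _ => none
  | fuel + 1, cs =>
    match bFieldF (cs.length + 1) cs false [] with
    | none => none
    | some (f, rest) =>
      match rest with
      | [] => some [f]
      | _ :: rest' => (f :: ·) <$> bFieldsF fuel rest'

def parse_sql_fields_alt (record : String) : List String :=
  (bFieldsF (record.toList.length + 1) record.toList).getD []

-- ===== PRECONDITION & SPEC =====
-- quote-balance scanner, independent of both ports: state = (inside string, pending backslash)
def scanStep (st : Bool × Bool) (c : Char) : Bool × Bool :=
  if st.2 then (st.1, false)
  else if st.1 then
    if c = '\\' then (true, true) else if c = '\'' then (false, false) else (true, false)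
  else if c = '\'' then (true, false) else (false, false)


-- Pre_ excludes exactly the records whose final quoted string is unterminated: there the
-- Python A raises a ValueError (and B raises the same).
def Pre_parse_sql_fields (record : String) : Prop :=
  (record.toList.foldl scanStep (false, false)).1 = false
instance (record : String) : Decidable (Pre_parse_sql_fields record) := by
  unfold Pre_parse_sql_fields; infer_instance

def pvWitness_parse_sql_fields : String := "a, 'b,''c' x ,d"

def Spec_parse_sql_fields (record : String) (out : List String) : Prop := out = parse_sql_fields_alt record
instance (record : String) (out : List String) : Decidable (Spec_parse_sql_fields record out) := by unfold Spec_parse_sql_fields; infer_instance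

-- ===== CLAIM (what is proved, stated in full; the proofs are below) =====
def Claim_equal_parse_sql_fields : Prop := ∀ (record : String), Dom_parse_sql_fields record → Pre_parse_sql_fields record → Spec_parse_sql_fields record (parse_sql_fields record)

-- ===== LEMMAS AND PROOFS =====
-- ---------- helpers (proof side) ----------
def pvFin (acc : List Char) (cis : Bool) : String :=
  if cis then String.ofList acc else PySem.Str.strip (String.ofList acc)

def pvCont (f : String) (r : List Char) (fields : List String) : List String :=
  match r with
  | [] => fields ++ [f]
  | _ :: r' => aRun r' (fields ++ [f]) [] false false false

-- ---------- aRun step lemmas ----------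
theorem aRun_nil (fields : List String) (acc : List Char) (i e cis : Bool) :
    aRun [] fields acc i e cis = fields ++ [pvFin acc cis] := by
  rw [aRun.eq_def]; rfl

theorem aRun_esc (c : Char) (rest : List Char) (fields : List String) (acc : List Char) (cis : Bool) :
    aRun (c :: rest) fields acc true true cis = aRun rest fields (acc ++ bEsc c) true false cis := by
  rw [aRun.eq_def]; simp [bEsc]

theorem aRun_bs (rest : List Char) (fields : List String) (acc : List Char) (cis : Bool) :
    aRun ('\\' :: rest) fields acc true false cis = aRun rest fields acc true true cis := by
  rw [aRun.eq_def]; simp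

theorem aRun_qq (rest : List Char) (fields : List String) (acc : List Char) (cis : Bool) :
    aRun ('\'' :: '\'' :: rest) fields acc true false cis
      = aRun rest fields (acc ++ ['\'']) true false cis := by
  rw [aRun.eq_def]; simp

theorem aRun_qend (rest : List Char) (fields : List String) (acc : List Char) (cis : Bool)
    (h : ∀ x, rest ≠ '\'' :: x) :
    aRun ('\'' :: rest) fields acc true false cis = aRun rest fields acc false false cis := by
  rw [aRun.eq_def]
  rcases rest with _ | ⟨e, r⟩
  · simp
  · have he : ¬ (e = '\'') := fun hh => h r (by rw [hh])
    simp [he]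

theorem aRun_instr (c : Char) (rest : List Char) (fields : List String) (acc : List Char) (cis : Bool)
    (h1 : ¬ c = '\\') (h2 : ¬ c = '\'') :
    aRun (c :: rest) fields acc true false cis = aRun rest fields (acc ++ [c]) true false cis := by
  rw [aRun.eq_def]; simp [h1, h2]

theorem aRun_q (rest : List Char) (fields : List String) (acc : List Char) (cis : Bool) :
    aRun ('\'' :: rest) fields acc false false cis = aRun rest fields acc true false true := by
  rw [aRun.eq_def]; simp

theorem aRun_comma (rest : List Char) (fields : List String) (acc : List Char) (cis : Bool) :
    aRun (',' :: rest) fields acc false false cis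
      = aRun rest (fields ++ [pvFin acc cis]) [] false false false := by
  rw [aRun.eq_def]; simp [pvFin]

theorem aRun_ws (c : Char) (rest : List Char) (fields : List String) (acc : List Char) (cis : Bool)
    (hw : c = ' ' ∨ c = '\t' ∨ c = '\r' ∨ c = '\n') :
    aRun (c :: rest) fields acc false false cis
      = if acc ≠ [] ∧ cis = false then aRun rest fields (acc ++ [c]) false false cis
        else aRun rest fields acc false false cis := by
  have h2 : ¬ c = '\'' := by rcases hw with rfl|rfl|rfl|rfl <;> decide
  have h3 : ¬ c = ',' := by rcases hw with rfl|rfl|rfl|rfl <;> decide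
  rw [aRun.eq_def]; simp [h2, h3, hw]
  rcases acc with _ | ⟨x, a⟩
  · simp
  · cases cis <;> simp

theorem aRun_other (c : Char) (rest : List Char) (fields : List String) (acc : List Char) (cis : Bool)
    (h1 : ¬ c = '\'') (h2 : ¬ c = ',')
    (h3 : ¬ (c = ' ' ∨ c = '\t' ∨ c = '\r' ∨ c = '\n')) :
    aRun (c :: rest) fields acc false false cis
      = aRun rest fields (acc ++ [c]) false false cis := by
  rw [aRun.eq_def]; simp [h1, h2, h3]

-- ---------- bQuoted lemmas ----------
theorem bQuoted_len : ∀ cs a r, bQuoted cs = some (a, r) → r.length ≤ cs.length := by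
  intro cs
  induction cs using bQuoted.induct with
  | case1 => intro a r h; simp [bQuoted] at h
  | case2 => intro a r h; simp [bQuoted] at h
  | case3 d cs' ih =>
    intro a r h
    simp only [bQuoted] at h
    norm_num at h
    cases hq : bQuoted cs' with
    | none => rw [hq] at h; simp at h
    | some p =>
      obtain ⟨a', r'⟩ := p
      rw [hq] at h; simp at h
      obtain ⟨h1, h2⟩ := h
      try subst h1
      try subst h2
      have := ih a' r' hq
      simp_all
      omega
  | case4 =>
    intro a r h
    simp [bQuoted] at h
    simp [← h.2]
  | case5 cs' _ ih =>
    intro a r h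
    simp only [bQuoted] at h
    norm_num at h
    cases hq : bQuoted cs' with
    | none => rw [hq] at h; simp at h
    | some p =>
      obtain ⟨a', r'⟩ := p
      rw [hq] at h; simp at h
      obtain ⟨h1, h2⟩ := h
      try subst h1
      try subst h2
      have := ih a' r' hq
      simp_all
      omega
  | case6 e cs' he _ =>
    intro a r h
    rw [bQuoted.eq_def] at h
    simp [he] at h
    obtain ⟨h1, h2⟩ := h
    try subst h1
    try subst h2
    simp_all
  | case7 d cs' hb hq0 ih =>
    intro a r h
    rw [bQuoted.eq_def] at h
    simp [hb, hq0] at h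
    cases hq : bQuoted cs' with
    | none => rw [hq] at h; simp at h
    | some p =>
      obtain ⟨a', r'⟩ := p
      rw [hq] at h; simp at h
      obtain ⟨h1, h2⟩ := h
      try subst h1
      try subst h2
      have := ih a' r' hq
      simp_all
      omega

theorem scan_bQuoted_none : ∀ cs, bQuoted cs = none →
    (cs.foldl scanStep (true, false)).1 = true := by
  intro cs
  induction cs using bQuoted.induct with
  | case1 => intro _; simp [scanStep]
  | case2 => intro _; simp [scanStep]
  | case3 d cs' ih =>
    intro h
    simp only [bQuoted] at h
    norm_num at h
    cases hq : bQuoted cs' with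
    | some p => rw [hq] at h; simp at h
    | none => simp [List.foldl_cons, scanStep]; exact ih hq
  | case4 => intro h; simp [bQuoted] at h
  | case5 cs' _ ih =>
    intro h
    simp only [bQuoted] at h
    norm_num at h
    cases hq : bQuoted cs' with
    | some p => rw [hq] at h; simp at h
    | none => simp [List.foldl_cons, scanStep]; exact ih hq
  | case6 e cs' he _ =>
    intro h
    rw [bQuoted.eq_def] at h
    simp [he] at h
  | case7 d cs' hb hq0 ih =>
    intro h
    rw [bQuoted.eq_def] at h
    simp [hb, hq0] at h
    cases hq : bQuoted cs' with
    | some p => rw [hq] at h; simp at h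
    | none => simp [List.foldl_cons, scanStep, hb, hq0]; exact ih hq

theorem scan_bQuoted_some : ∀ cs a r, bQuoted cs = some (a, r) →
    cs.foldl scanStep (true, false) = r.foldl scanStep (false, false) := by
  intro cs
  induction cs using bQuoted.induct with
  | case1 => intro a r h; simp [bQuoted] at h
  | case2 => intro a r h; simp [bQuoted] at h
  | case3 d cs' ih =>
    intro a r h
    simp only [bQuoted] at h
    norm_num at h
    cases hq : bQuoted cs' with
    | none => rw [hq] at h; simp at h
    | some p =>
      obtain ⟨a', r'⟩ := p
      rw [hq] at h; simp at h
      obtain ⟨h1, h2⟩ := h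
      try subst h1
      try subst h2
      simpa [List.foldl_cons, scanStep] using ih a' r' hq
  | case4 =>
    intro a r h
    simp [bQuoted] at h
    rw [← h.2]; simp [scanStep]
  | case5 cs' _ ih =>
    intro a r h
    simp only [bQuoted] at h
    norm_num at h
    cases hq : bQuoted cs' with
    | none => rw [hq] at h; simp at h
    | some p =>
      obtain ⟨a', r'⟩ := p
      rw [hq] at h; simp at h
      obtain ⟨h1, h2⟩ := h
      try subst h1
      try subst h2
      simpa [List.foldl_cons, scanStep] using ih a' r' hq
  | case6 e cs' he _ =>
    intro a r h
    rw [bQuoted.eq_def] at h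
    simp [he] at h
    obtain ⟨h1, h2⟩ := h
    try subst h1
    try subst h2
    simp_all [List.foldl_cons, scanStep, he]
  | case7 d cs' hb hq0 ih =>
    intro a r h
    rw [bQuoted.eq_def] at h
    simp [hb, hq0] at h
    cases hq : bQuoted cs' with
    | none => rw [hq] at h; simp at h
    | some p =>
      obtain ⟨a', r'⟩ := p
      rw [hq] at h; simp at h
      obtain ⟨h1, h2⟩ := h
      try subst h1
      try subst h2
      simpa [List.foldl_cons, scanStep, hb, hq0] using ih a' r' hq

theorem aRun_bQuoted : ∀ cs a r, bQuoted cs = some (a, r) →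
    ∀ fields acc cis, aRun cs fields acc true false cis
      = aRun r fields (acc ++ a) false false cis := by
  intro cs
  induction cs using bQuoted.induct with
  | case1 => intro a r h; simp [bQuoted] at h
  | case2 => intro a r h; simp [bQuoted] at h
  | case3 d cs' ih =>
    intro a r h
    simp only [bQuoted] at h
    norm_num at h
    cases hq : bQuoted cs' with
    | none => rw [hq] at h; simp at h
    | some p =>
      obtain ⟨a', r'⟩ := p
      rw [hq] at h; simp at h
      obtain ⟨h1, h2⟩ := h
      try subst h1
      try subst h2
      intro fields acc cis
      rw [aRun_bs, aRun_esc, ih a' r' hq]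
      simp
  | case4 =>
    intro a r h
    simp [bQuoted] at h
    obtain ⟨h1, h2⟩ := h
    try subst h1
    try subst h2
    intro fields acc cis
    rw [aRun_qend _ _ _ _ (by intro x hx; cases hx)]
    simp_all
  | case5 cs' _ ih =>
    intro a r h
    simp only [bQuoted] at h
    norm_num at h
    cases hq : bQuoted cs' with
    | none => rw [hq] at h; simp at h
    | some p =>
      obtain ⟨a', r'⟩ := p
      rw [hq] at h; simp at h
      obtain ⟨h1, h2⟩ := h
      try subst h1
      try subst h2
      intro fields acc cis
      rw [aRun_qq, ih a' r' hq]
      simp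
  | case6 e cs' he _ =>
    intro a r h
    rw [bQuoted.eq_def] at h
    simp [he] at h
    obtain ⟨h1, h2⟩ := h
    try subst h1
    try subst h2
    intro fields acc cis
    rw [aRun_qend _ _ _ _ (by intro x hx; injection hx with hx1 _; exact he hx1)]
    simp_all
  | case7 d cs' hb hq0 ih =>
    intro a r h
    rw [bQuoted.eq_def] at h
    simp [hb, hq0] at h
    cases hq : bQuoted cs' with
    | none => rw [hq] at h; simp at h
    | some p =>
      obtain ⟨a', r'⟩ := p
      rw [hq] at h; simp at h
      obtain ⟨h1, h2⟩ := h
      try subst h1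
      try subst h2
      intro fields acc cis
      rw [aRun_instr _ _ _ _ _ hb hq0, ih a' r' hq]
      simp

theorem bFieldF_len : ∀ fuel cs wq out f r, bFieldF fuel cs wq out = some (f, r) →
    r.length ≤ cs.length := by
  intro fuel
  induction fuel with
  | zero => intro cs wq out f r h; simp [bFieldF] at h
  | succ fuel ih =>
    intro cs wq out f r h
    rcases cs with _ | ⟨c, rest⟩
    · simp [bFieldF] at h; simp [← h.2]
    · by_cases hc : c = ','
      · subst hc; simp [bFieldF] at h; simp [← h.2]
      · by_cases hq : c = '\''
        · subst hq
          simp only [bFieldF] at h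
          norm_num [hc] at h
          cases hbq : bQuoted rest with
          | none => rw [hbq] at h; simp at h
          | some p =>
            obtain ⟨chunk, rest2⟩ := p
            rw [hbq] at h; simp at h
            have h1 := ih rest2 true (out ++ chunk) f r h
            have h2 := bQuoted_len rest chunk rest2 hbq
            simp; omega
        · by_cases hw : c = ' ' ∨ c = '\t' ∨ c = '\r' ∨ c = '\n'
          · simp only [bFieldF] at h
            rw [if_neg hc, if_neg hq, if_pos hw] at h
            by_cases hcond : out ≠ [] ∧ wq = false
            · rw [if_pos hcond] at h
              have := ih rest wq (out ++ [c]) f r h; simp; omega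
            · rw [if_neg hcond] at h
              have := ih rest wq out f r h; simp; omega
          · simp only [bFieldF] at h
            rw [if_neg hc, if_neg hq, if_neg hw] at h
            have := ih rest wq (out ++ [c]) f r h; simp; omega

theorem bFieldF_rest : ∀ fuel cs wq out f r, bFieldF fuel cs wq out = some (f, r) →
    r = [] ∨ ∃ r', r = ',' :: r' := by
  intro fuel
  induction fuel with
  | zero => intro cs wq out f r h; simp [bFieldF] at h
  | succ fuel ih =>
    intro cs wq out f r h
    rcases cs with _ | ⟨c, rest⟩
    · simp [bFieldF] at h; left; simp [← h.2]
    · by_cases hc : c = ','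
      · subst hc; simp [bFieldF] at h; right; exact ⟨rest, (h.2).symm⟩
      · by_cases hq : c = '\''
        · subst hq
          simp only [bFieldF] at h
          norm_num [hc] at h
          cases hbq : bQuoted rest with
          | none => rw [hbq] at h; simp at h
          | some p =>
            obtain ⟨chunk, rest2⟩ := p
            rw [hbq] at h; simp at h
            exact ih rest2 true (out ++ chunk) f r h
        · by_cases hw : c = ' ' ∨ c = '\t' ∨ c = '\r' ∨ c = '\n'
          · simp only [bFieldF] at h
            rw [if_neg hc, if_neg hq, if_pos hw] at h
            by_cases hcond : out ≠ [] ∧ wq = false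
            · rw [if_pos hcond] at h; exact ih rest wq (out ++ [c]) f r h
            · rw [if_neg hcond] at h; exact ih rest wq out f r h
          · simp only [bFieldF] at h
            rw [if_neg hc, if_neg hq, if_neg hw] at h
            exact ih rest wq (out ++ [c]) f r h

theorem scan_bFieldF_none : ∀ fuel cs wq out, cs.length < fuel →
    bFieldF fuel cs wq out = none → (cs.foldl scanStep (false, false)).1 = true := by
  intro fuel
  induction fuel with
  | zero => intro cs wq out hlen h; omega
  | succ fuel ih =>
    intro cs wq out hlen h
    rcases cs with _ | ⟨c, rest⟩
    · simp [bFieldF] at h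
    · by_cases hc : c = ','
      · subst hc; simp [bFieldF] at h
      · by_cases hq : c = '\''
        · subst hq
          simp only [bFieldF] at h
          norm_num [hc] at h
          cases hbq : bQuoted rest with
          | none =>
            simp [List.foldl_cons, scanStep]
            exact scan_bQuoted_none rest hbq
          | some p =>
            obtain ⟨chunk, rest2⟩ := p
            rw [hbq] at h; simp at h
            have hlen2 : rest2.length < fuel := by
              have := bQuoted_len rest chunk rest2 hbq
              simp at hlen; omega
            have h1 := ih rest2 true (out ++ chunk) hlen2 h
            have h2 := scan_bQuoted_some rest chunk rest2 hbq
            simp [List.foldl_cons, scanStep]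
            rw [h2]; exact h1
        · by_cases hw : c = ' ' ∨ c = '\t' ∨ c = '\r' ∨ c = '\n'
          · simp only [bFieldF] at h
            rw [if_neg hc, if_neg hq, if_pos hw] at h
            have hlen2 : rest.length < fuel := by simp at hlen; omega
            by_cases hcond : out ≠ [] ∧ wq = false
            · rw [if_pos hcond] at h
              have := ih rest wq (out ++ [c]) hlen2 h
              simpa [List.foldl_cons, scanStep, hq] using this
            · rw [if_neg hcond] at h
              have := ih rest wq out hlen2 h
              simpa [List.foldl_cons, scanStep, hq] using this
          · simp only [bFieldF] at h
            rw [if_neg hc, if_neg hq, if_neg hw] at h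
            have hlen2 : rest.length < fuel := by simp at hlen; omega
            have := ih rest wq (out ++ [c]) hlen2 h
            simpa [List.foldl_cons, scanStep, hq] using this

theorem scan_bFieldF_some : ∀ fuel cs wq out f r, bFieldF fuel cs wq out = some (f, r) →
    cs.foldl scanStep (false, false) = r.foldl scanStep (false, false) := by
  intro fuel
  induction fuel with
  | zero => intro cs wq out f r h; simp [bFieldF] at h
  | succ fuel ih =>
    intro cs wq out f r h
    rcases cs with _ | ⟨c, rest⟩
    · simp [bFieldF] at h; rw [← h.2]
    · by_cases hc : c = ','
      · subst hc; simp [bFieldF] at h; rw [← h.2]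
      · by_cases hq : c = '\''
        · subst hq
          simp only [bFieldF] at h
          norm_num [hc] at h
          cases hbq : bQuoted rest with
          | none => rw [hbq] at h; simp at h
          | some p =>
            obtain ⟨chunk, rest2⟩ := p
            rw [hbq] at h; simp at h
            have h1 := ih rest2 true (out ++ chunk) f r h
            have h2 := scan_bQuoted_some rest chunk rest2 hbq
            simp [List.foldl_cons, scanStep]
            rw [h2]; exact h1
        · by_cases hw : c = ' ' ∨ c = '\t' ∨ c = '\r' ∨ c = '\n'
          · simp only [bFieldF] at h
            rw [if_neg hc, if_neg hq, if_pos hw] at h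
            by_cases hcond : out ≠ [] ∧ wq = false
            · rw [if_pos hcond] at h
              have := ih rest wq (out ++ [c]) f r h
              simpa [List.foldl_cons, scanStep, hq] using this
            · rw [if_neg hcond] at h
              have := ih rest wq out f r h
              simpa [List.foldl_cons, scanStep, hq] using this
          · simp only [bFieldF] at h
            rw [if_neg hc, if_neg hq, if_neg hw] at h
            have := ih rest wq (out ++ [c]) f r h
            simpa [List.foldl_cons, scanStep, hq] using this

theorem aRun_bFieldF : ∀ fuel cs wq out f r, bFieldF fuel cs wq out = some (f, r) →
    ∀ fields, aRun cs fields out false false wq = pvCont f r fields := by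
  intro fuel
  induction fuel with
  | zero => intro cs wq out f r h; simp [bFieldF] at h
  | succ fuel ih =>
    intro cs wq out f r h
    rcases cs with _ | ⟨c, rest⟩
    · simp [bFieldF] at h
      obtain ⟨h1, h2⟩ := h
      intro fields
      subst h2
      rw [aRun_nil, pvCont]
      simp [pvFin, ← h1]
    · by_cases hc : c = ','
      · subst hc; simp [bFieldF] at h
        obtain ⟨h1, h2⟩ := h
        intro fields
        subst h2
        rw [pvCont, aRun_comma]
        simp [pvFin, ← h1]
      · by_cases hq : c = '\''
        · subst hq
          simp only [bFieldF] at h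
          norm_num [hc] at h
          cases hbq : bQuoted rest with
          | none => rw [hbq] at h; simp at h
          | some p =>
            obtain ⟨chunk, rest2⟩ := p
            rw [hbq] at h; simp at h
            intro fields
            rw [aRun_q, aRun_bQuoted rest chunk rest2 hbq, ih rest2 true (out ++ chunk) f r h]
        · by_cases hw : c = ' ' ∨ c = '\t' ∨ c = '\r' ∨ c = '\n'
          · simp only [bFieldF] at h
            rw [if_neg hc, if_neg hq, if_pos hw] at h
            intro fields
            by_cases hcond : out ≠ [] ∧ wq = false
            · rw [if_pos hcond] at h
              obtain ⟨ho, hwq⟩ := hcond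
              subst hwq
              rw [aRun_ws _ _ _ _ _ hw, if_pos ⟨ho, rfl⟩, ih rest false (out ++ [c]) f r h]
            · rw [if_neg hcond] at h
              rw [aRun_ws _ _ _ _ _ hw, if_neg hcond, ih rest wq out f r h]
          · simp only [bFieldF] at h
            rw [if_neg hc, if_neg hq, if_neg hw] at h
            intro fields
            rw [aRun_other _ _ _ _ _ hq hc hw, ih rest wq (out ++ [c]) f r h]

theorem aRun_bFieldsF : ∀ n cs, cs.length < n →
    (cs.foldl scanStep (false, false)).1 = false →
    ∃ fs, bFieldsF n cs = some fs ∧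
      ∀ fields, aRun cs fields [] false false false = fields ++ fs := by
  intro n
  induction n with
  | zero => intro cs hlen _; omega
  | succ n ihn =>
    intro cs hlen hscan
    cases hbf : bFieldF (cs.length + 1) cs false [] with
    | none =>
      exact absurd hscan (by simp [scan_bFieldF_none (cs.length + 1) cs false [] (by omega) hbf])
    | some p =>
      obtain ⟨f, r⟩ := p
      rcases bFieldF_rest (cs.length + 1) cs false [] f r hbf with rfl | ⟨r', rfl⟩
      · refine ⟨[f], ?_, ?_⟩
        · simp [bFieldsF, hbf]
        · intro fields
          rw [aRun_bFieldF (cs.length + 1) cs false [] f [] hbf fields, pvCont]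
      · have hscan2 : (r'.foldl scanStep (false, false)).1 = false := by
          have h1 := scan_bFieldF_some (cs.length + 1) cs false [] f (',' :: r') hbf
          rw [h1] at hscan
          simpa [List.foldl_cons, scanStep] using hscan
        have hlen2 : r'.length < n := by
          have := bFieldF_len (cs.length + 1) cs false [] f (',' :: r') hbf
          simp at this; omega
        obtain ⟨fs', hb', ha'⟩ := ihn r' hlen2 hscan2
        refine ⟨f :: fs', ?_, ?_⟩
        · simp [bFieldsF, hbf, hb']
        · intro fields
          rw [aRun_bFieldF (cs.length + 1) cs false [] f (',' :: r') hbf fields, pvCont, ha']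
          simp

theorem aRun_eq_bFieldsF_getD : ∀ (record : String),
    (record.toList.foldl scanStep (false, false)).1 = false →
    aRun record.toList [] [] false false false
      = (bFieldsF (record.toList.length + 1) record.toList).getD [] := by
  intro record hpre
  obtain ⟨fs, hb, ha⟩ := aRun_bFieldsF (record.toList.length + 1) record.toList (by omega) hpre
  rw [hb, ha]
  simp

-- ===== VERDICT (by name: the statement is the Claim_ definition above) =====
theorem parse_sql_fields_spec : Claim_equal_parse_sql_fields := by
  intro record _ hpre
  unfold Pre_parse_sql_fields at hpre
  unfold Spec_parse_sql_fields parse_sql_fields parse_sql_fields_alt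
  exact aRun_eq_bFieldsF_getD record hpre
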